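-- pv_equiv track=rewrite | github.com/zel-forprogress/context_bridge | src/context_bridge/parsers/base.py | strip_system_context
-- ===== SOURCE A (Python) =====
-- _SYSTEM_CTX_TAGS = (
--     "<permissions instructions>",
--     "<app-context>",
--     "<collaboration_mode>",
--     "<skills_instructions>",
--     "<plugins_instructions>",
--     "<environment_context>",
-- )
--
-- def strip_system_context(text: str) -> str:
--     """剥离注入的系统上下文块（如 <app-context>...</app-context>）"""
--     result: list[str] = []
--     skip = False
--     for line in text.splitlines():
--         stripped = line.strip()
--         if any(stripped.startswith(tag) for tag in _SYSTEM_CTX_TAGS):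
--             skip = True
--             continue
--         if skip and stripped.startswith("</"):
--             skip = False
--             continue
--         if not skip:
--             result.append(line)
--     return "\n".join(result).strip()
-- ===== SOURCE B (Python) =====
-- _SYSTEM_CTX_TAGS = (
--     "<permissions instructions>",
--     "<app-context>",
--     "<collaboration_mode>",
--     "<skills_instructions>",
--     "<plugins_instructions>",
--     "<environment_context>",
-- )
--
-- def strip_system_context(text: str) -> str:
--     """Strip injected system-context blocks (e.g. <app-context>...</app-context>)."""
--     lines = text.splitlines()
--     n = len(lines)
--     result: list[str] = []
--     i = 0
--     while i < n:
--         line = lines[i]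
--         if line.strip().startswith(_SYSTEM_CTX_TAGS):
--             # consume the whole block as a unit, up to and including its closer
--             i += 1
--             while i < n:
--                 i += 1
--                 if lines[i - 1].strip().startswith("</"):
--                     break
--         else:
--             result.append(line)
--             i += 1
--     return "\n".join(result).strip()
-- ===== Notes on version B (the rewrite author's own statement) =====
-- stated objective: alternative
-- what changed: Replaces the skip-flag state machine threaded through every line with an explicit index walk that, on seeing an opening tag, consumes the whole injected block (up to and including its '</' closer, or end of input) in a dedicated inner loop.
import Mathlib
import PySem

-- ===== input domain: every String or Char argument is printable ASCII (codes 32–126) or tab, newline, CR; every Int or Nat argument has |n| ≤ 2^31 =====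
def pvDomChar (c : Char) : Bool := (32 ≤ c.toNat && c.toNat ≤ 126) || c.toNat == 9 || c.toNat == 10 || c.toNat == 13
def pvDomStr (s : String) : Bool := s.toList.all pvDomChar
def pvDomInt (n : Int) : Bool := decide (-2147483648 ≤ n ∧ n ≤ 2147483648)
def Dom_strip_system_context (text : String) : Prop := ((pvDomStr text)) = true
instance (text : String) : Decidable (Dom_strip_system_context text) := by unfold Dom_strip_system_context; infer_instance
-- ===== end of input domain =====

-- B consumes each injected tag block as a unit with an inner loop instead of A's per-line skip flag; same result (alternative decomposition).

def pvTags : List String :=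
  ["<permissions instructions>", "<app-context>", "<collaboration_mode>",
   "<skills_instructions>", "<plugins_instructions>", "<environment_context>"]

-- ===== PORT A =====
def pvStepA : (List String × Bool) → String → (List String × Bool)
  | (res, skip), line =>
    let stripped := PySem.Str.strip line
    if pvTags.any (fun t => PySem.Str.startswith stripped t) then (res, true)
    else if skip && PySem.Str.startswith stripped "</" then (res, false)
    else if !skip then (res ++ [line], skip)
    else (res, skip)

def strip_system_context (text : String) : String :=
  PySem.Str.strip (PySem.Str.join "\n" ((PySem.Str.splitlines text).foldl pvStepA ([], false)).1)

-- ===== PORT B =====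
-- B's inner while loop: advance past the block, consuming the '</' closer line if one appears
def pvConsume : List String → List String
  | [] => []
  | l :: ls => if PySem.Str.startswith (PySem.Str.strip l) "</" then ls else pvConsume ls

-- needed for pvKeep's termination
theorem pvConsume_length_le : ∀ ls : List String, (pvConsume ls).length ≤ ls.length := by
  intro ls
  induction ls with
  | nil => simp [pvConsume]
  | cons l ls ih =>
    simp only [pvConsume]
    split
    · simp
    · exact Nat.le_succ_of_le ih

-- B's outer while loop over the line index
def pvKeep : List String → List String
  | [] => []
  | l :: ls =>
    if pvTags.any (fun t => PySem.Str.startswith (PySem.Str.strip l) t) then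
      pvKeep (pvConsume ls)
    else
      l :: pvKeep ls
termination_by ls => ls.length
decreasing_by
  · exact Nat.lt_succ_of_le (pvConsume_length_le ls)
  · simp

def strip_system_context_alt (text : String) : String :=
  PySem.Str.strip (PySem.Str.join "\n" (pvKeep (PySem.Str.splitlines text)))

-- ===== PRECONDITION & SPEC =====
def Spec_strip_system_context (text : String) (out : String) : Prop := out = strip_system_context_alt text
instance (text : String) (out : String) : Decidable (Spec_strip_system_context text out) := by unfold Spec_strip_system_context; infer_instance

-- ===== CLAIM (what is proved, stated in full; the proofs are below) =====
def Claim_equal_strip_system_context : Prop := ∀ (text : String), Dom_strip_system_context text → Spec_strip_system_context text (strip_system_context text)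

-- ===== LEMMAS AND PROOFS =====

-- a string that starts with '<'·c·…, c ≠ '/', does not start with "</"
theorem pvHelp (c : Char) (t cs : List Char) (hc : c ≠ '/')
    (h : PySem.Chars.startswith cs ('<' :: c :: t) = true) :
    PySem.Chars.startswith cs ['<', '/'] = false := by
  rw [PySem.Chars.startswith_iff] at h
  by_contra hx
  simp only [Bool.not_eq_false] at hx
  rw [PySem.Chars.startswith_iff] at hx
  obtain ⟨r, rfl⟩ := hx
  obtain ⟨u, hu⟩ := h
  simp only [List.cons_append, List.cons.injEq] at hu
  exact hc hu.2.1

-- a line that starts with one of the opening tags does not start with "</"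
theorem pvTag_not_closer (s : String)
    (h : pvTags.any (fun t => PySem.Str.startswith (PySem.Str.strip s) t) = true) :
    PySem.Str.startswith (PySem.Str.strip s) "</" = false := by
  simp only [pvTags, List.any_cons, List.any_nil, PySem.Str.startswith_eq,
    Bool.or_false, Bool.or_eq_true] at h ⊢
  have hcl : "</".toList = ['<', '/'] := by decide
  rw [hcl]
  rcases h with h | h | h | h | h | h
  · exact pvHelp 'p' _ _ (by decide) (by rw [show "<permissions instructions>".toList = '<' :: 'p' :: "ermissions instructions>".toList from by decide] at h; exact h)
  · exact pvHelp 'a' _ _ (by decide) (by rw [show "<app-context>".toList = '<' :: 'a' :: "pp-context>".toList from by decide] at h; exact h)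
  · exact pvHelp 'c' _ _ (by decide) (by rw [show "<collaboration_mode>".toList = '<' :: 'c' :: "ollaboration_mode>".toList from by decide] at h; exact h)
  · exact pvHelp 's' _ _ (by decide) (by rw [show "<skills_instructions>".toList = '<' :: 's' :: "kills_instructions>".toList from by decide] at h; exact h)
  · exact pvHelp 'p' _ _ (by decide) (by rw [show "<plugins_instructions>".toList = '<' :: 'p' :: "lugins_instructions>".toList from by decide] at h; exact h)
  · exact pvHelp 'e' _ _ (by decide) (by rw [show "<environment_context>".toList = '<' :: 'e' :: "nvironment_context>".toList from by decide] at h; exact h)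

-- loop invariant: A's fold with skip = false computes B's pvKeep; with skip = true it computes pvKeep after pvConsume
theorem pvFold_main : ∀ (n : Nat) (ls : List String), ls.length ≤ n → ∀ acc : List String,
    ((ls.foldl pvStepA (acc, false)).1 = acc ++ pvKeep ls ∧
     (ls.foldl pvStepA (acc, true)).1 = acc ++ pvKeep (pvConsume ls)) := by
  intro n
  induction n with
  | zero =>
    intro ls hls acc
    rw [List.length_eq_zero_iff.mp (Nat.le_zero.mp hls)]
    simp [pvKeep, pvConsume]
  | succ n ih =>
    intro ls hls acc
    cases ls with
    | nil => simp [pvKeep, pvConsume]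
    | cons l ls' =>
      have hlen : ls'.length ≤ n := Nat.le_of_succ_le_succ hls
      constructor
      · rw [List.foldl_cons]
        by_cases htag : pvTags.any (fun t => PySem.Str.startswith (PySem.Str.strip l) t) = true
        · simp only [pvStepA, htag, if_true]
          rw [(ih ls' hlen acc).2, pvKeep]
          rw [if_pos htag]
        · simp only [pvStepA, htag, Bool.false_and, Bool.not_false, Bool.false_eq_true, if_true,
            if_false]
          rw [(ih ls' hlen (acc ++ [l])).1, pvKeep, if_neg htag, List.append_assoc]
          rfl
      · rw [List.foldl_cons]
        by_cases htag : pvTags.any (fun t => PySem.Str.startswith (PySem.Str.strip l) t) = true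
        · have hncl := pvTag_not_closer l htag
          simp only [pvStepA, htag, if_true]
          rw [(ih ls' hlen acc).2]
          rw [pvConsume, if_neg (by simpa using hncl)]
        · by_cases hcl : PySem.Str.startswith (PySem.Str.strip l) "</" = true
          · simp only [pvStepA, htag, hcl, Bool.true_and, Bool.false_eq_true, if_true, if_false]
            rw [(ih ls' hlen acc).1, pvConsume, if_pos hcl]
          · simp only [pvStepA, htag, hcl, Bool.true_and, Bool.not_true, Bool.false_eq_true,
              if_false]
            rw [(ih ls' hlen acc).2, pvConsume, if_neg hcl]

-- ===== VERDICT (by name: the statement is the Claim_ definition above) =====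
theorem strip_system_context_spec : Claim_equal_strip_system_context := by
  intro text _
  unfold Spec_strip_system_context strip_system_context strip_system_context_alt
  rw [(pvFold_main (PySem.Str.splitlines text).length _ le_rfl []).1]
  rfl
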